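-- pv_equiv track=rewrite | github.com/larynx95/rosalind | src/ba06/ba06i_graph_to_genome/ba06i_01.py | graph_to_genome3
-- ===== SOURCE A (Python) =====
-- def cycle_to_chromosome(nodes):
--     """
--     [int] -> [str]
--     return a list of strings (signed integers)
--     >>> cycle_to_chromosome([1,2,4,3,6,5,7,8])
--         (+1 -2 -3 +4)
--     """
--     chromosome = []
--     for j in range(0, len(nodes) // 2):
--         if nodes[2*j] < nodes[2*j + 1]:
--             chromosome.append('+' + str(nodes[2*j + 1] // 2))
--         else:
--             chromosome.append('-' + str(nodes[2*j] // 2))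
--     return chromosome
--
-- def graph_to_genome3(genome_graph):
--     """
--     [(int,int)] -> str
--     >>> graph_to_genome3([(2,4),(3,6),(5,1),(7,9),(10,12),(11,8)])
--         [['+1','-2','-3'],['-4','+5','-6']]
--     >>> graph_to_genome3([(2,4),(3,8),(7,5),(6,1)])
--         [['+1','-2','-4','+3']]
--     """
--     genome = []
--     nodes = []
--     for edge in genome_graph:
--         adj_left = edge[0] + 1 if edge[0] % 2 == 1 else edge[0] - 1
--         nodes += [adj_left, edge[0]]
--         if nodes[0] == edge[1]:
--             genome.append(cycle_to_chromosome(nodes))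
--             nodes = []
--     return genome
-- ===== SOURCE B (Python) =====
-- def graph_to_genome3(genome_graph):
--     genome = []
--     chrom = []
--     start = 0
--     for edge in genome_graph:
--         adj_left = edge[0] + 1 if edge[0] % 2 == 1 else edge[0] - 1
--         if not chrom:
--             start = adj_left
--         if adj_left < edge[0]:
--             chrom.append('+' + str(edge[0] // 2))
--         else:
--             chrom.append('-' + str(adj_left // 2))
--         if start == edge[1]:
--             genome.append(chrom)
--             chrom = []
--     return genome
-- ===== Notes on version B (the rewrite author's own statement) =====
-- stated objective: simpler
-- what changed: B drops the accumulated nodes list and the cycle_to_chromosome helper entirely: a single pass over the edges appends each signed gene directly to the current chromosome, tracking only the cycle's start node in a scalar.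
import Mathlib
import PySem

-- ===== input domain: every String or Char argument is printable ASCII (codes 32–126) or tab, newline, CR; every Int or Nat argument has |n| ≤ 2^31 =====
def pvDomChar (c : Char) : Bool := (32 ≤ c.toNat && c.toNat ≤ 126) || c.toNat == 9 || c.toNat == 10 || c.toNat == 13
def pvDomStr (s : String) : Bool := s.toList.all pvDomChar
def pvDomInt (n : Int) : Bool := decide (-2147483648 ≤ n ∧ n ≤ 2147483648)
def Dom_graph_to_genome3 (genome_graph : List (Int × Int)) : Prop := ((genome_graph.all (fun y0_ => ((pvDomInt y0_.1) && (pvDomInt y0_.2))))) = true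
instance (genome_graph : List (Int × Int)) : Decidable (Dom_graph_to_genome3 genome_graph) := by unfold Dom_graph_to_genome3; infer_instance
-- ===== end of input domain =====

-- B fuses the cycle_to_chromosome helper away: one pass over the edges appends each signed gene
-- directly to the current chromosome, tracking only the cycle's start node (alternative decomposition, same cost).

-- ===== PORT A =====
def cycle_to_chromosome (nodes : List Int) : List String :=
  (PySem.List.pyRange 0 ((nodes.length : Int) / 2) 1).foldl (fun chromosome j =>
    if PySem.List.pyGetD nodes (2 * j) 0 < PySem.List.pyGetD nodes (2 * j + 1) 0 then
      chromosome ++ ["+" ++ PySem.Int.toStr (PySem.Int.floordiv (PySem.List.pyGetD nodes (2 * j + 1) 0) 2)]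
    else
      chromosome ++ ["-" ++ PySem.Int.toStr (PySem.Int.floordiv (PySem.List.pyGetD nodes (2 * j) 0) 2)]) []

def graph_to_genome3 (genome_graph : List (Int × Int)) : List (List String) :=
  (genome_graph.foldl (fun (st : List (List String) × List Int) edge =>
    let adj_left : Int := if PySem.Int.mod edge.1 2 = 1 then edge.1 + 1 else edge.1 - 1
    let nodes := st.2 ++ [adj_left, edge.1]
    if PySem.List.pyGetD nodes 0 0 = edge.2 then (st.1 ++ [cycle_to_chromosome nodes], [])
    else (st.1, nodes)) ([], [])).1

-- ===== PORT B =====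
def graph_to_genome3_alt (genome_graph : List (Int × Int)) : List (List String) :=
  (genome_graph.foldl (fun (st : List (List String) × List String × Int) edge =>
    let adj_left : Int := if PySem.Int.mod edge.1 2 = 1 then edge.1 + 1 else edge.1 - 1
    let start := if st.2.1.isEmpty then adj_left else st.2.2
    let chrom := st.2.1 ++
      [if adj_left < edge.1 then "+" ++ PySem.Int.toStr (PySem.Int.floordiv edge.1 2)
       else "-" ++ PySem.Int.toStr (PySem.Int.floordiv adj_left 2)]
    if start = edge.2 then (st.1 ++ [chrom], [], start)
    else (st.1, chrom, start)) ([], [], 0)).1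

-- ===== PRECONDITION & SPEC =====
def Spec_graph_to_genome3 (genome_graph : List (Int × Int)) (out : List (List String)) : Prop := out = graph_to_genome3_alt genome_graph
instance (genome_graph : List (Int × Int)) (out : List (List String)) : Decidable (Spec_graph_to_genome3 genome_graph out) := by unfold Spec_graph_to_genome3; infer_instance

-- ===== CLAIM (what is proved, stated in full; the proofs are below) =====
def Claim_equal_graph_to_genome3 : Prop := ∀ (genome_graph : List (Int × Int)), Dom_graph_to_genome3 genome_graph → Spec_graph_to_genome3 genome_graph (graph_to_genome3 genome_graph)

-- ===== LEMMAS AND PROOFS =====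

-- named copies of the two fold bodies (proof helpers only; the ports above are the claim)
def stepA (st : List (List String) × List Int) (edge : Int × Int) : List (List String) × List Int :=
  let adj_left : Int := if PySem.Int.mod edge.1 2 = 1 then edge.1 + 1 else edge.1 - 1
  let nodes := st.2 ++ [adj_left, edge.1]
  if PySem.List.pyGetD nodes 0 0 = edge.2 then (st.1 ++ [cycle_to_chromosome nodes], [])
  else (st.1, nodes)

def stepB (st : List (List String) × List String × Int) (edge : Int × Int) :
    List (List String) × List String × Int :=
  let adj_left : Int := if PySem.Int.mod edge.1 2 = 1 then edge.1 + 1 else edge.1 - 1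
  let start := if st.2.1.isEmpty then adj_left else st.2.2
  let chrom := st.2.1 ++
    [if adj_left < edge.1 then "+" ++ PySem.Int.toStr (PySem.Int.floordiv edge.1 2)
     else "-" ++ PySem.Int.toStr (PySem.Int.floordiv adj_left 2)]
  if start = edge.2 then (st.1 ++ [chrom], [], start)
  else (st.1, chrom, start)

-- the signed gene A's helper produces for pair index j
def pvGene (nodes : List Int) (j : Int) : String :=
  if PySem.List.pyGetD nodes (2 * j) 0 < PySem.List.pyGetD nodes (2 * j + 1) 0 then
    "+" ++ PySem.Int.toStr (PySem.Int.floordiv (PySem.List.pyGetD nodes (2 * j + 1) 0) 2)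
  else
    "-" ++ PySem.Int.toStr (PySem.Int.floordiv (PySem.List.pyGetD nodes (2 * j) 0) 2)

lemma cyc_eq_map (nodes : List Int) :
    cycle_to_chromosome nodes =
      (PySem.List.pyRange 0 ((nodes.length : Int) / 2) 1).map (pvGene nodes) := by
  unfold cycle_to_chromosome
  have hfun : (fun (chromosome : List String) (j : Int) =>
      if PySem.List.pyGetD nodes (2 * j) 0 < PySem.List.pyGetD nodes (2 * j + 1) 0 then
        chromosome ++ ["+" ++ PySem.Int.toStr (PySem.Int.floordiv (PySem.List.pyGetD nodes (2 * j + 1) 0) 2)]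
      else
        chromosome ++ ["-" ++ PySem.Int.toStr (PySem.Int.floordiv (PySem.List.pyGetD nodes (2 * j) 0) 2)]) =
      (fun chromosome j => chromosome ++ [pvGene nodes j]) := by
    funext ch j; unfold pvGene; split_ifs <;> rfl
  rw [hfun, PySem.List.foldl_append_singleton_eq_map]
  simp

lemma pvGetD_append_left (xs ys : List Int) (i : Int) (h0 : 0 ≤ i) (h : i < (xs.length : Int)) :
    PySem.List.pyGetD (xs ++ ys) i 0 = PySem.List.pyGetD xs i 0 := by
  rw [PySem.List.pyGetD_eq_getElem _ _ h0 (by simp; omega),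
      PySem.List.pyGetD_eq_getElem _ _ h0 h]
  exact List.getElem_append_left (by omega)

lemma cyc_nil : cycle_to_chromosome [] = [] := by
  rw [cyc_eq_map]; simp

lemma cyc_len (nodes : List Int) :
    (cycle_to_chromosome nodes).length = ((nodes.length : Int) / 2).toNat := by
  rw [cyc_eq_map]; simp [PySem.List.length_pyRange_one]

-- appending one edge's node pair to an even-length node list appends exactly one gene
lemma cyc_append (nodes : List Int) (a b : Int) (h : nodes.length % 2 = 0) :
    cycle_to_chromosome (nodes ++ [a, b]) =
      cycle_to_chromosome nodes ++
        [if a < b then "+" ++ PySem.Int.toStr (PySem.Int.floordiv b 2)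
         else "-" ++ PySem.Int.toStr (PySem.Int.floordiv a 2)] := by
  have hn2 : ((nodes ++ [a, b]).length : Int) / 2 = (nodes.length : Int) / 2 + 1 := by
    simp; omega
  rw [cyc_eq_map, cyc_eq_map, hn2,
      PySem.List.pyRange_one_succ_right (by omega), List.map_append]
  congr 1
  · apply List.map_congr_left
    intro j hj
    rw [PySem.List.mem_pyRange_one] at hj
    unfold pvGene
    rw [pvGetD_append_left _ _ _ (by omega) (by omega),
        pvGetD_append_left _ _ _ (by omega) (by omega)]
  · simp only [List.map_cons, List.map_nil]
    unfold pvGene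
    have h2j : 2 * ((nodes.length : Int) / 2) = (nodes.length : Int) := by omega
    have ha : PySem.List.pyGetD (nodes ++ [a, b]) (2 * ((nodes.length : Int) / 2)) 0 = a := by
      rw [h2j, PySem.List.pyGetD_eq_getElem _ _ (by omega) (by simp)]
      simp [List.getElem_append_right]
    have hb : PySem.List.pyGetD (nodes ++ [a, b]) (2 * ((nodes.length : Int) / 2) + 1) 0 = b := by
      rw [h2j, PySem.List.pyGetD_eq_getElem _ _ (by omega) (by simp)]
      have ht : ((nodes.length : Int) + 1).toNat = nodes.length + 1 := by omega
      simp only [ht]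
      rw [List.getElem_append_right (by omega)]
      simp
    rw [ha, hb]

lemma loop_eq (g : List (Int × Int)) (genome : List (List String)) (nodes : List Int) (start : Int)
    (hev : nodes.length % 2 = 0)
    (hst : nodes ≠ [] → PySem.List.pyGetD nodes 0 0 = start) :
    (g.foldl stepA (genome, nodes)).1 =
    (g.foldl stepB (genome, cycle_to_chromosome nodes, start)).1 := by
  induction g generalizing genome nodes start with
  | nil => rfl
  | cons e g ih =>
    rw [List.foldl_cons, List.foldl_cons]
    set al : Int := if PySem.Int.mod e.1 2 = 1 then e.1 + 1 else e.1 - 1 with hal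
    set start' : Int := if (cycle_to_chromosome nodes).isEmpty then al else start with hstart'
    have hcond : PySem.List.pyGetD (nodes ++ [al, e.1]) 0 0 = start' := by
      rw [hstart']
      cases hn : nodes with
      | nil => subst hn; simp [cyc_nil, PySem.List.pyGetD_zero_cons]
      | cons x xs =>
        subst hn
        have hne : (cycle_to_chromosome (x :: xs)).isEmpty = false := by
          rw [List.isEmpty_eq_false_iff, ← List.length_pos_iff, cyc_len]
          simp at hev ⊢; omega
        have hx := hst (by simp)
        rw [PySem.List.pyGetD_zero_cons] at hx
        simp [hne, PySem.List.pyGetD_zero_cons]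
        exact hx
    have hA : stepA (genome, nodes) e =
        if PySem.List.pyGetD (nodes ++ [al, e.1]) 0 0 = e.2 then
          (genome ++ [cycle_to_chromosome (nodes ++ [al, e.1])], ([] : List Int))
        else (genome, nodes ++ [al, e.1]) := rfl
    have hB : stepB (genome, cycle_to_chromosome nodes, start) e =
        if start' = e.2 then
          (genome ++ [cycle_to_chromosome (nodes ++ [al, e.1])], ([] : List String), start')
        else (genome, cycle_to_chromosome (nodes ++ [al, e.1]), start') := by
      rw [cyc_append nodes al e.1 hev]; rfl
    by_cases hc : PySem.List.pyGetD (nodes ++ [al, e.1]) 0 0 = e.2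
    · rw [hA, if_pos hc, hB, if_pos (hcond ▸ hc)]
      simpa [cyc_nil] using
        ih (genome ++ [cycle_to_chromosome (nodes ++ [al, e.1])]) [] start' rfl (by simp)
    · rw [hA, if_neg hc, hB, if_neg (hcond ▸ hc)]
      exact ih genome (nodes ++ [al, e.1]) start' (by simp; omega) (fun _ => hcond)

-- ===== VERDICT (by name: the statement is the Claim_ definition above) =====
theorem graph_to_genome3_spec : Claim_equal_graph_to_genome3 := by
  intro g _
  show graph_to_genome3 g = graph_to_genome3_alt g
  have hA : graph_to_genome3 g = (g.foldl stepA ([], [])).1 := rfl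
  have hB : graph_to_genome3_alt g = (g.foldl stepB ([], [], 0)).1 := rfl
  rw [hA, hB, ← cyc_nil]
  exact loop_eq g [] [] 0 rfl (by simp)
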